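-- pv_equiv track=rewrite | github.com/eliottcassidy2000/math | 04-computation/h_positivity_test.py | is_self_converse
-- ===== SOURCE A (Python) =====
-- def is_self_converse(n, adj):
--     """Check if tournament is isomorphic to its converse."""
--     # Quick check: score sequence must be palindromic
--     scores = []
--     for i in range(n):
--         s = sum(adj.get((i,j), 0) for j in range(n) if j != i)
--         scores.append(s)
--     scores_sorted = sorted(scores)
--     rev = sorted(scores, reverse=True)
--     complement_scores = [n-1-s for s in scores_sorted]
--     if sorted(complement_scores) != scores_sorted:
--         return False
--     # Full check would require isomorphism testing; skip for now
--     return True  # Necessary condition only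
-- ===== SOURCE B (Python) =====
-- def is_self_converse(n, adj):
--     """Check if tournament is isomorphic to its converse (necessary score condition)."""
--     row = {}
--     for (i, j), v in adj.items():
--         if 0 <= i < n and 0 <= j < n and i != j:
--             row[i] = row.get(i, 0) + v
--     ss = sorted(row.get(i, 0) for i in range(n))
--     for k in range((n + 1) // 2):
--         if ss[k] + ss[n - 1 - k] != n - 1:
--             return False
--     return True
-- ===== Notes on version B (the rewrite author's own statement) =====
-- stated objective: faster
-- what changed: B replaces A's O(n^2) scan over all (i,j) pairs (a dict lookup per pair) by one aggregation pass over the dict items to build the per-vertex scores, then one sort and a pairwise check scores[k]+scores[n-1-k]==n-1 instead of building and re-sorting a complement list.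
import Mathlib
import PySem

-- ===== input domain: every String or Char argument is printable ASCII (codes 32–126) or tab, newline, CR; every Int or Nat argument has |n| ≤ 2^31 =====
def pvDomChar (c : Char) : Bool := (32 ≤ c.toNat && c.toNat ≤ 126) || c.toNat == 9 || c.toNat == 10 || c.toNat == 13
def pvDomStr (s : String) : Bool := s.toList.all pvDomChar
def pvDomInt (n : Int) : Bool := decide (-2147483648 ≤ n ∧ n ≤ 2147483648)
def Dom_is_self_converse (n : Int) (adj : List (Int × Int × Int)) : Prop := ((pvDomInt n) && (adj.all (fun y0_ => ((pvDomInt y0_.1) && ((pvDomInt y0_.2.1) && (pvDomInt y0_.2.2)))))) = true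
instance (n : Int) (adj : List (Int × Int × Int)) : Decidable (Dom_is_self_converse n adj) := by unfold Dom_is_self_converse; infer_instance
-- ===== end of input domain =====

-- B replaces A's O(n^2) scan of all (i,j) pairs by a single aggregation pass over the dict
-- items plus one sort and a pairwise palindromic check (return value only; neither mutates).

-- ===== PORT A =====
-- adj.get((i,j), 0) on the association-list encoding of the dict (first match wins)
def pvAGet (adj : List (Int × Int × Int)) (i j : Int) : Int :=
  match adj.find? (fun t => t.1 == i && t.2.1 == j) with
  | some t => t.2.2
  | none => 0

def is_self_converse (n : Int) (adj : List (Int × Int × Int)) : Bool :=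
  let scores := (PySem.List.pyRange 0 n 1).map (fun i =>
    (((PySem.List.pyRange 0 n 1).filter (fun j => j != i)).map (fun j => pvAGet adj i j)).sum)
  let scores_sorted := PySem.List.sorted scores (fun x => x) false
  let _rev := PySem.List.sorted scores (fun x => x) true
  let complement_scores := scores_sorted.map (fun s => n - 1 - s)
  if PySem.List.sorted complement_scores (fun x => x) false ≠ scores_sorted then false
  else true

-- ===== PORT B =====
-- one step of the aggregation loop 'for (i, j), v in adj.items(): if …: row[i] = row.get(i,0)+v'
def pvStep (n : Int) (d : PySem.Dict Int Int) (t : Int × Int × Int) : PySem.Dict Int Int :=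
  if 0 ≤ t.1 ∧ t.1 < n ∧ 0 ≤ t.2.1 ∧ t.2.1 < n ∧ t.1 ≠ t.2.1
  then d.modify t.1 0 (· + t.2.2) else d

def is_self_converse_alt (n : Int) (adj : List (Int × Int × Int)) : Bool :=
  let row := adj.foldl (pvStep n) PySem.Dict.empty
  let ss := PySem.List.sorted ((PySem.List.pyRange 0 n 1).map (fun i => row.getD i 0)) (fun x => x) false
  (PySem.List.pyRange 0 (PySem.Int.floordiv (n + 1) 2) 1).all
    (fun k => PySem.List.pyGetD ss k 0 + PySem.List.pyGetD ss (n - 1 - k) 0 == n - 1)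

-- ===== PRECONDITION & SPEC =====
-- Pre_ excludes association lists carrying a duplicate (i,j) key: a Python dict argument can
-- never contain one, and on such lists A's first-match lookup and B's summing fold are both arbitrary.
def Pre_is_self_converse (n : Int) (adj : List (Int × Int × Int)) : Prop :=
  (adj.map (fun t => (t.1, t.2.1))).Nodup
instance (n : Int) (adj : List (Int × Int × Int)) : Decidable (Pre_is_self_converse n adj) := by unfold Pre_is_self_converse; infer_instance

def pvWitness_is_self_converse : Int × (List (Int × Int × Int)) := (3, [(0, 1, 1), (1, 2, 1), (2, 0, 1)])

def Spec_is_self_converse (n : Int) (adj : List (Int × Int × Int)) (out : Bool) : Prop := out = is_self_converse_alt n adj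
instance (n : Int) (adj : List (Int × Int × Int)) (out : Bool) : Decidable (Spec_is_self_converse n adj out) := by unfold Spec_is_self_converse; infer_instance

-- ===== CLAIM (what is proved, stated in full; the proofs are below) =====
def Claim_equal_is_self_converse : Prop := ∀ (n : Int) (adj : List (Int × Int × Int)), Dom_is_self_converse n adj → Pre_is_self_converse n adj → Spec_is_self_converse n adj (is_self_converse n adj)

-- ===== LEMMAS AND PROOFS =====

-- the total weight B's loop adds to row[i]
def pvT (n i : Int) (adj : List (Int × Int × Int)) : Int :=
  ((adj.filter (fun t => decide (0 ≤ t.1 ∧ t.1 < n ∧ 0 ≤ t.2.1 ∧ t.2.1 < n ∧ t.1 ≠ t.2.1) && (t.1 == i))).map (fun t => t.2.2)).sum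

theorem pvT_cons (n i : Int) (t : Int × Int × Int) (rest : List (Int × Int × Int)) :
    pvT n i (t :: rest) =
      (if (0 ≤ t.1 ∧ t.1 < n ∧ 0 ≤ t.2.1 ∧ t.2.1 < n ∧ t.1 ≠ t.2.1) ∧ t.1 = i then t.2.2 else 0)
        + pvT n i rest := by
  unfold pvT
  by_cases h : (0 ≤ t.1 ∧ t.1 < n ∧ 0 ≤ t.2.1 ∧ t.2.1 < n ∧ t.1 ≠ t.2.1) ∧ t.1 = i
  · have hc : (decide (0 ≤ t.1 ∧ t.1 < n ∧ 0 ≤ t.2.1 ∧ t.2.1 < n ∧ t.1 ≠ t.2.1) && (t.1 == i)) = true := by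
      simp only [Bool.and_eq_true, decide_eq_true_eq, beq_iff_eq]
      exact ⟨h.1, h.2⟩
    rw [List.filter_cons, hc, if_pos rfl, if_pos h, List.map_cons, List.sum_cons]
  · rw [List.filter_cons]
    have : (decide (0 ≤ t.1 ∧ t.1 < n ∧ 0 ≤ t.2.1 ∧ t.2.1 < n ∧ t.1 ≠ t.2.1) && (t.1 == i)) = false := by
      simp only [Bool.and_eq_false_iff, decide_eq_false_iff_not, beq_eq_false_iff_ne]
      tauto
    simp [h]

theorem pvRow_getD (n : Int) (adj : List (Int × Int × Int)) :
    ∀ (d : PySem.Dict Int Int) (i : Int),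
      (adj.foldl (pvStep n) d).getD i 0 = d.getD i 0 + pvT n i adj := by
  induction adj with
  | nil => intro d i; simp [pvT]
  | cons t rest ih =>
    intro d i
    rw [List.foldl_cons, ih, pvT_cons]
    unfold pvStep
    by_cases h : 0 ≤ t.1 ∧ t.1 < n ∧ 0 ≤ t.2.1 ∧ t.2.1 < n ∧ t.1 ≠ t.2.1
    · rw [if_pos h, PySem.Dict.getD_modify]
      by_cases hi : i = t.1
      · simp [hi, h]; ring
      · simp [hi]
        intros
        omega
    · simp [h]

theorem pvAGet_cons (t : Int × Int × Int) (rest : List (Int × Int × Int)) (i j : Int) :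
    pvAGet (t :: rest) i j = if t.1 = i ∧ t.2.1 = j then t.2.2 else pvAGet rest i j := by
  unfold pvAGet
  rw [List.find?_cons]
  by_cases h : t.1 = i ∧ t.2.1 = j
  · have : (t.1 == i && t.2.1 == j) = true := by simp [h.1, h.2]
    simp [h]
  · have : (t.1 == i && t.2.1 == j) = false := by
      simp only [Bool.and_eq_false_iff, beq_eq_false_iff_ne]
      tauto
    simp [this, h]

theorem pvAGet_eq_zero (rest : List (Int × Int × Int)) (i j : Int)
    (h : (i, j) ∉ rest.map (fun t => (t.1, t.2.1))) : pvAGet rest i j = 0 := by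
  induction rest with
  | nil => rfl
  | cons t r ih =>
    rw [pvAGet_cons]
    simp only [List.map_cons, List.mem_cons, not_or] at h
    have h1 : ¬ (t.1 = i ∧ t.2.1 = j) := by
      intro hc
      exact h.1 (by simp [hc.1, hc.2])
    rw [if_neg h1]
    exact ih h.2

theorem pv_sum_ite_eq_mem (L : List Int) (c v : Int) (h : L.Nodup) :
    (L.map (fun j => if c = j then v else 0)).sum = if c ∈ L then v else 0 := by
  induction L with
  | nil => simp
  | cons a L ih =>
    simp only [List.nodup_cons] at h
    rw [List.map_cons, List.sum_cons, ih h.2]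
    by_cases hc : c = a
    · subst hc
      simp [h.1]
    · simp [hc]

theorem pvScore_eq_T (n : Int) (adj : List (Int × Int × Int))
    (hnd : (adj.map (fun t => (t.1, t.2.1))).Nodup) (i : Int) (h0 : 0 ≤ i) (h1 : i < n) :
    (((PySem.List.pyRange 0 n 1).filter (fun j => j != i)).map (fun j => pvAGet adj i j)).sum
      = pvT n i adj := by
  induction adj with
  | nil =>
    simp only [pvT, List.filter_nil, List.map_nil, List.sum_nil]
    have : ∀ j ∈ (PySem.List.pyRange 0 n 1).filter (fun j => j != i), pvAGet [] i j = 0 := by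
      intro j _; rfl
    rw [List.map_congr_left this]
    simp
  | cons t rest ih =>
    simp only [List.map_cons, List.nodup_cons] at hnd
    have hkey : (i, t.2.1) ∉ rest.map (fun t => (t.1, t.2.1)) → pvAGet rest i t.2.1 = 0 :=
      pvAGet_eq_zero rest i t.2.1
    have hstep : ∀ j ∈ (PySem.List.pyRange 0 n 1).filter (fun j => j != i),
        pvAGet (t :: rest) i j = (if t.1 = i ∧ t.2.1 = j then t.2.2 else 0) + pvAGet rest i j := by
      intro j _
      rw [pvAGet_cons]
      by_cases h : t.1 = i ∧ t.2.1 = j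
      · rw [if_pos h, if_pos h]
        have : pvAGet rest i j = 0 := by
          apply pvAGet_eq_zero
          rw [← h.1, ← h.2]
          exact hnd.1
        omega
      · rw [if_neg h, if_neg h]; omega
    rw [List.map_congr_left hstep, List.sum_map_add, ih hnd.2, pvT_cons]
    congr 1
    have hnodupL : ((PySem.List.pyRange 0 n 1).filter (fun j => j != i)).Nodup :=
      (PySem.List.nodup_pyRange_one 0 n).filter _
    by_cases ht : t.1 = i
    · have : ∀ j ∈ (PySem.List.pyRange 0 n 1).filter (fun j => j != i),
          (if t.1 = i ∧ t.2.1 = j then t.2.2 else (0:Int)) = (if t.2.1 = j then t.2.2 else 0) := by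
        intro j _; simp [ht]
      rw [List.map_congr_left this, pv_sum_ite_eq_mem _ _ _ hnodupL]
      have hmem : t.2.1 ∈ (PySem.List.pyRange 0 n 1).filter (fun j => j != i)
          ↔ (0 ≤ t.2.1 ∧ t.2.1 < n ∧ t.2.1 ≠ i) := by
        simp [List.mem_filter, PySem.List.mem_pyRange_one]
        tauto
      by_cases hm : 0 ≤ t.2.1 ∧ t.2.1 < n ∧ t.2.1 ≠ i
      · rw [if_pos (hmem.mpr hm), if_pos ⟨⟨by omega, by omega, hm.1, hm.2.1, by omega⟩, ht⟩]
      · rw [if_neg (fun hc => hm (hmem.mp hc)), if_neg (by intro hc; apply hm; obtain ⟨⟨_,_,_,_,hne⟩, _⟩ := hc; exact ⟨by omega, by omega, by omega⟩)]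
    · have : ∀ j ∈ (PySem.List.pyRange 0 n 1).filter (fun j => j != i),
          (if t.1 = i ∧ t.2.1 = j then t.2.2 else (0:Int)) = 0 := by
        intro j _; simp [ht]
      rw [List.map_congr_left this]
      simp [ht]

-- the palindromic-score test: A's sorted-complement comparison ⇔ B's pairwise check
theorem pv_pal (n : Int) (ss : List Int) (hp : ss.Pairwise (· ≤ ·)) (hlen : ss.length = n.toNat) :
    (PySem.List.sorted (ss.map (fun s => n - 1 - s)) (fun x => x) false = ss)
      ↔ (∀ k ∈ PySem.List.pyRange 0 (PySem.Int.floordiv (n + 1) 2) 1,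
           PySem.List.pyGetD ss k 0 + PySem.List.pyGetD ss (n - 1 - k) 0 = n - 1) := by
  have hm : PySem.Int.floordiv (n + 1) 2 = (n + 1) / 2 := by
    unfold PySem.Int.floordiv
    rw [Int.fdiv_eq_ediv]
    simp
  rw [hm]
  have hrev : ∀ (K : Nat) (hK : K < ss.length),
      ((ss.map (fun s => n - 1 - s)).reverse)[K]'(by simpa using hK)
        = n - 1 - ss[ss.length - 1 - K]'(by omega) := by
    intro K hK
    simp only [List.getElem_reverse, List.getElem_map, List.length_map]
  have hsort : PySem.List.sorted (ss.map (fun s => n - 1 - s)) (fun x => x) false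
      = (ss.map (fun s => n - 1 - s)).reverse := by
    apply PySem.List.sorted_id_eq_of_perm_of_pairwise
    · exact (ss.map _).reverse_perm
    · rw [List.pairwise_reverse]
      exact List.Pairwise.map _ (fun a b hab => by omega) hp
  rw [hsort]
  constructor
  · intro h k hk
    rw [PySem.List.mem_pyRange_one] at hk
    have hn1 : 1 ≤ n := by omega
    have hkn : k < n := by omega
    have hlb : (0:Int) ≤ n - 1 - k := by omega
    rw [PySem.List.pyGetD_eq_getElem ss 0 hk.1 (by push_cast [hlen]; omega),
        PySem.List.pyGetD_eq_getElem ss 0 hlb (by push_cast [hlen]; omega)]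
    have hK : k.toNat < ss.length := by omega
    have hkey : ss[k.toNat]'hK = n - 1 - ss[ss.length - 1 - k.toNat]'(by omega) := by
      rw [← List.getElem_of_eq h (show k.toNat < (ss.map (fun s => n - 1 - s)).reverse.length by
        simpa using hK)]
      exact hrev k.toNat hK
    have hidx : (n - 1 - k).toNat = ss.length - 1 - k.toNat := by omega
    simp only [hidx]
    omega
  · intro hB
    apply List.ext_getElem (by simp)
    intro K h1 h2
    rw [hrev K h2]
    have hn1 : 1 ≤ n := by omega
    by_cases hc : (K : Int) < (n + 1) / 2
    · have hb := hB (K : Int) (by rw [PySem.List.mem_pyRange_one]; omega)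
      rw [PySem.List.pyGetD_eq_getElem ss 0 (by omega) (by push_cast [hlen]; omega),
          PySem.List.pyGetD_eq_getElem ss 0 (by omega) (by push_cast [hlen]; omega)] at hb
      have e1 : ((K : Int)).toNat = K := by omega
      have e2 : (n - 1 - (K : Int)).toNat = ss.length - 1 - K := by omega
      simp only [e1, e2] at hb
      omega
    · have hb := hB (n - 1 - (K : Int)) (by rw [PySem.List.mem_pyRange_one]; omega)
      rw [PySem.List.pyGetD_eq_getElem ss 0 (by omega) (by push_cast [hlen]; omega),
          PySem.List.pyGetD_eq_getElem ss 0 (by omega) (by push_cast [hlen]; omega)] at hb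
      have e1 : (n - 1 - (K : Int)).toNat = ss.length - 1 - K := by omega
      have e2 : (n - 1 - (n - 1 - (K : Int))).toNat = K := by omega
      simp only [e1, e2] at hb
      omega

-- ===== VERDICT (by name: the statement is the Claim_ definition above) =====
theorem is_self_converse_spec : Claim_equal_is_self_converse := by
  intro n adj _ hpre
  unfold Spec_is_self_converse
  show is_self_converse n adj = is_self_converse_alt n adj
  have hscores : (PySem.List.pyRange 0 n 1).map (fun i =>
      (((PySem.List.pyRange 0 n 1).filter (fun j => j != i)).map (fun j => pvAGet adj i j)).sum)
      = (PySem.List.pyRange 0 n 1).map (fun i => (adj.foldl (pvStep n) PySem.Dict.empty).getD i 0) := by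
    apply List.map_congr_left
    intro i hi
    rw [PySem.List.mem_pyRange_one] at hi
    rw [pvScore_eq_T n adj hpre i hi.1 hi.2, pvRow_getD]
    simp
  simp only [is_self_converse, is_self_converse_alt]
  rw [hscores]
  have hp : (PySem.List.sorted ((PySem.List.pyRange 0 n 1).map
      (fun i => (adj.foldl (pvStep n) PySem.Dict.empty).getD i 0)) (fun x => x) false).Pairwise (· ≤ ·) :=
    PySem.List.sorted_pairwise _ _
  have hlen : (PySem.List.sorted ((PySem.List.pyRange 0 n 1).map
      (fun i => (adj.foldl (pvStep n) PySem.Dict.empty).getD i 0)) (fun x => x) false).length = n.toNat := by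
    rw [PySem.List.length_sorted, List.length_map, PySem.List.length_pyRange_one]
    omega
  have hiff := pv_pal n _ hp hlen
  rw [Bool.eq_iff_iff]
  split_ifs with h
  · constructor
    · intro hfalse
      exact absurd hfalse (by simp)
    · intro hall
      exfalso
      apply h
      apply hiff.mpr
      intro k hk
      have := (List.all_eq_true.mp hall) k hk
      simpa using this
  · constructor
    · intro _
      rw [List.all_eq_true]
      intro k hk
      have := hiff.mp (of_not_not h) k hk
      simpa using this
    · intro _
      rfl
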